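-- pv_equiv track=rewrite | github.com/tildedave/cryptopals-set8 | problem63.py | element_egcd
-- ===== SOURCE A (Python) =====
-- from typing import List, Optional, Tuple
--
-- FieldElement = int  # Element of GF(2^128)
--
-- def element_add(p1: FieldElement, p2: FieldElement):
--     return p1 ^ p2
--
-- element_subtract = element_add
--
-- def element_degree(p1: FieldElement):
--     return p1.bit_length() - 1
--
-- def element_mult(a: FieldElement,
--                  b: FieldElement,
--                  mod: Optional[FieldElement] = None,
--                  ) -> FieldElement:
--     p = 0
--     while a > 0:
--         if a & 1:
--             p ^= b
--         a >>= 1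
--         b <<= 1
--
--         if mod is not None and element_degree(b) == element_degree(mod):
--             b ^= mod
--
--     if mod is not None and p > mod:
--         return element_divmod(p, mod)[1]
--
--     return p
--
-- def element_divmod(a: FieldElement,
--                    b: FieldElement,
--                    ) -> Tuple[FieldElement, FieldElement]:
--     """
--     Returns (a // b, a % b)
--     """
--     q, r = 0, a
--
--     while element_degree(r) >= element_degree(b):
--         d = element_degree(r) - element_degree(b)
--         q = q ^ (1 << d)
--         r = r ^ (b << d)
--
--     return q, r
--
-- def element_egcd(a: FieldElement,
--                  b: FieldElement):
--     """
--     Return (d, u, v) so that a * u + b * v = d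
--     """
--     if a == 0:
--         return (b, 0, 1)
--     else:
--         q, r = element_divmod(b, a)
--         # so now q * b + r == a
--         assert element_add(element_mult(q, a), r) == b
--
--         g, x, y = element_egcd(r, a)
--         return (g, element_subtract(y, element_mult(q, x)), x)
-- ===== SOURCE B (Python) =====
-- from typing import Tuple
--
-- FieldElement = int
--
--
-- def element_add(p1: FieldElement, p2: FieldElement):
--     return p1 ^ p2
--
--
-- element_subtract = element_add
--
--
-- def element_degree(p1: FieldElement):
--     return p1.bit_length() - 1
--
--
-- def element_mult(a: FieldElement, b: FieldElement) -> FieldElement: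
--     p = 0
--     while a > 0:
--         if a & 1:
--             p ^= b
--         a >>= 1
--         b <<= 1
--     return p
--
--
-- def element_divmod(a: FieldElement, b: FieldElement) -> Tuple[FieldElement, FieldElement]:
--     q, r = 0, a
--     while element_degree(r) >= element_degree(b):
--         d = element_degree(r) - element_degree(b)
--         q = q ^ (1 << d)
--         r = r ^ (b << d)
--     return q, r
--
--
-- def element_egcd(a: FieldElement, b: FieldElement):
--     """
--     Return (d, u, v) so that a * u + b * v = d
--     """
--     # forward pass: collect the quotient sequence of the Euclidean descent
--     quotients = []
--     x, y = a, b
--     while x != 0: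
--         q, r = element_divmod(y, x)
--         quotients.append(q)
--         x, y = r, x
--     # backward pass: fold the Bezout coefficients over the quotients
--     u, v = 0, 1
--     for q in reversed(quotients):
--         u, v = element_subtract(v, element_mult(q, u)), u
--     return (y, u, v)
-- ===== Notes on version B (the rewrite author's own statement) =====
-- stated objective: alternative
-- what changed: Replaced A's recursion by an iterative extended Euclid: a forward while-loop collecting the quotient sequence, then a backward fold over the reversed quotients computing the Bezout coefficients.
import Mathlib
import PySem

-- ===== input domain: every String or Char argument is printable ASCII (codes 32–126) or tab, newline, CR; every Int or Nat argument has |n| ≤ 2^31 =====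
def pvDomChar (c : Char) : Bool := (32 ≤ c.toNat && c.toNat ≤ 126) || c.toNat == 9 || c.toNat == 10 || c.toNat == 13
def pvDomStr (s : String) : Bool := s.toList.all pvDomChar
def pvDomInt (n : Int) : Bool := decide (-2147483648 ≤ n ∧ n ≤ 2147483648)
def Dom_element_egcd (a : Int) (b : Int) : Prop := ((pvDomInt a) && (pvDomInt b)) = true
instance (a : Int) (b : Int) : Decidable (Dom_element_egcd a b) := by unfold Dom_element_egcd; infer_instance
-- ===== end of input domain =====

-- B replaces A's recursion by an iterative forward pass collecting the quotient sequence and a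
-- backward fold producing the Bezout coefficients (objective: alternative decomposition, same cost).

-- ===== PORT A =====
-- shared field helpers (identical source code in Source A and Source B)

-- element_degree(p) = p.bit_length() - 1 (Python-exact, also on negatives)
def pyDegree (p : Int) : Int := (PySem.Int.bitLength p : Int) - 1

-- element_mult's while loop (called in egcd only with mod=None, so the two `mod is not None`
-- branches are constantly skipped and are not ported); fuel only makes the loop total:
-- while a > 0, a is halved each step, so a.natAbs + 1 steps always suffice.
def multAux : Nat → Int → Int → Int → Int
  | 0, _, _, p => p
  | n + 1, a, b, p =>
    if a > 0 then
      multAux n (a >>> 1) (b <<< 1) (if PySem.Int.band a 1 ≠ 0 then PySem.Int.bxor p b else p)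
    else p

def element_mult (a : Int) (b : Int) : Int := multAux (a.natAbs + 1) a b 0

-- element_divmod's while loop; the guard gives pyDegree r - pyDegree b ≥ 0, so .toNat is exact.
-- Fuel: on the inputs A terminates on, the degree of r strictly drops each step, so
-- a.natAbs + 1 steps suffice (r starts at a).
def divmodAux : Nat → Int → Int → Int → Int × Int
  | 0, _, q, r => (q, r)
  | n + 1, b, q, r =>
    if pyDegree r ≥ pyDegree b then
      let d := (pyDegree r - pyDegree b).toNat
      divmodAux n b (PySem.Int.bxor q ((1 : Int) <<< d)) (PySem.Int.bxor r (b <<< d))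
    else (q, r)

def element_divmod (a : Int) (b : Int) : Int × Int := divmodAux (a.natAbs + 1) b 0 a

-- A's recursion; the Python `assert` holds wherever the Python terminates and is not ported.
-- Fuel: whenever the Python recursion terminates it does so within a.natAbs + 1 levels
-- (for nonnegative inputs the first argument strictly decreases).
def egcdAux : Nat → Int → Int → Int × Int × Int
  | 0, _, b => (b, 0, 1)
  | n + 1, a, b =>
    if a = 0 then (b, 0, 1)
    else
      let qr := element_divmod b a
      let gxy := egcdAux n qr.2 a
      (gxy.1, PySem.Int.bxor gxy.2.2 (element_mult qr.1 gxy.2.1), gxy.2.1)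

def element_egcd (a : Int) (b : Int) : Int × Int × Int := egcdAux (a.natAbs + 1) a b

-- ===== PORT B =====
-- forward pass: the while loop collecting the quotients (same fuel bound as A's recursion depth)
def loopAux : Nat → List Int → Int → Int → List Int × Int
  | 0, qs, _, y => (qs, y)
  | n + 1, qs, x, y =>
    if x = 0 then (qs, y)
    else
      let qr := element_divmod y x
      loopAux n (qs ++ [qr.1]) qr.2 x

-- backward pass body: u, v = element_subtract(v, element_mult(q, u)), u
def stepB (uv : Int × Int) (q : Int) : Int × Int :=
  (PySem.Int.bxor uv.2 (element_mult q uv.1), uv.1)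

def element_egcd_alt (a : Int) (b : Int) : Int × Int × Int :=
  let qsy := loopAux (a.natAbs + 1) [] a b
  let uv := qsy.1.reverse.foldl stepB (0, 1)
  (qsy.2, uv.1, uv.2)

-- ===== PRECONDITION & SPEC =====
def Spec_element_egcd (a : Int) (b : Int) (out : Int × Int × Int) : Prop := out = element_egcd_alt a b
instance (a : Int) (b : Int) (out : Int × Int × Int) : Decidable (Spec_element_egcd a b out) := by
  unfold Spec_element_egcd; infer_instance

-- ===== CLAIM (what is proved, stated in full; the proofs are below) =====
def Claim_equal_element_egcd : Prop :=
  ∀ (a : Int) (b : Int), Dom_element_egcd a b → Spec_element_egcd a b (element_egcd a b)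

-- ===== LEMMAS AND PROOFS =====

-- the accumulated quotient prefix only gets prepended to the loop's own output
theorem loopAux_append (n : Nat) : ∀ (qs : List Int) (x y : Int),
    loopAux n qs x y = (qs ++ (loopAux n [] x y).1, (loopAux n [] x y).2) := by
  induction n with
  | zero => intro qs x y; simp [loopAux]
  | succ n ih =>
    intro qs x y
    by_cases hx : x = 0
    · simp [loopAux, hx]
    · simp only [loopAux, if_neg hx, List.nil_append]
      rw [ih (qs ++ [(element_divmod y x).1]), ih [(element_divmod y x).1]]
      simp

-- fuel-matched equivalence of A's recursion and B's two passes
theorem egcdAux_eq (n : Nat) : ∀ (a b : Int),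
    egcdAux n a b =
      ((loopAux n [] a b).2,
       ((loopAux n [] a b).1.reverse.foldl stepB (0, 1)).1,
       ((loopAux n [] a b).1.reverse.foldl stepB (0, 1)).2) := by
  induction n with
  | zero => intro a b; simp [egcdAux, loopAux]
  | succ n ih =>
    intro a b
    by_cases ha : a = 0
    · simp [egcdAux, loopAux, ha]
    · simp only [egcdAux, loopAux, if_neg ha, List.nil_append]
      rw [loopAux_append n [(element_divmod b a).1]]
      rw [ih (element_divmod b a).2 a]
      simp [stepB]

-- ===== VERDICT (by name: the statement is the Claim_ definition above) =====
theorem element_egcd_spec : Claim_equal_element_egcd := by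
  intro a b _
  unfold Spec_element_egcd element_egcd element_egcd_alt
  exact egcdAux_eq (a.natAbs + 1) a b
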